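-- pv_equiv track=rewrite | github.com/leo930206/ncku1131-introduction-to-data-science | HW0/hw0_p2.py | top_2_actors_most_genres
-- ===== SOURCE A (Python) =====
-- def get_column_index(header, column_name):
--     return header.index(column_name)
--
-- def top_2_actors_most_genres(header, data):
--     genre_idx = get_column_index(header, 'Genre')
--     actors_idx = get_column_index(header, 'Actors')
--
--     actor_genres = {}
--
--     for row in data:
--         genres = set(row[genre_idx].split('|'))  # 獲取該電影的所有類型（使用set避免重複類型）
--         actors = row[actors_idx].split('|')  # 獲取該電影的所有演員
--
--         for actor in actors:
--             actor = actor.strip()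
--             if actor not in actor_genres:
--                 actor_genres[actor] = set()  # 為每位演員建立一個類型集合
--             actor_genres[actor].update(genres)  # 更新該演員參演的類型集合
--
--     # 計算每位演員參演的獨特類型數量，並排序
--     actor_genre_count = {actor: len(genres) for actor, genres in actor_genres.items()}
--     sorted_actors = sorted(actor_genre_count, key=actor_genre_count.get, reverse=True)
--
--     return sorted_actors[:2]  # 回傳參演最多類型的前兩名演員
-- ===== SOURCE B (Python) =====
-- def top_2_actors_most_genres(header, data):
--     gi = header.index('Genre')
--     ai = header.index('Actors')
--
--     actor_genres = {}
--     for row in data: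
--         gs = row[gi].split('|')
--         for raw in row[ai].split('|'):
--             name = raw.strip()
--             actor_genres.setdefault(name, set()).update(gs)
--
--     # single linear pass keeping the best and second-best (first-seen wins ties),
--     # instead of sorting all actors by count and slicing
--     first = None   # (name, genre_count)
--     second = None
--     for name, gset in actor_genres.items():
--         n = len(gset)
--         if first is None or n > first[1]:
--             second = first
--             first = (name, n)
--         elif second is None or n > second[1]:
--             second = (name, n)
--     return [p[0] for p in (first, second) if p is not None]
-- ===== Notes on version B (the rewrite author's own statement) =====
-- stated objective: alternative
-- what changed: The final 'sort all actors by genre count descending, slice to two' is replaced by a single linear best/second-best scan with first-seen tie-breaking (and the dict build uses setdefault+list-update instead of a membership test plus set(...)-update).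
import Mathlib
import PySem

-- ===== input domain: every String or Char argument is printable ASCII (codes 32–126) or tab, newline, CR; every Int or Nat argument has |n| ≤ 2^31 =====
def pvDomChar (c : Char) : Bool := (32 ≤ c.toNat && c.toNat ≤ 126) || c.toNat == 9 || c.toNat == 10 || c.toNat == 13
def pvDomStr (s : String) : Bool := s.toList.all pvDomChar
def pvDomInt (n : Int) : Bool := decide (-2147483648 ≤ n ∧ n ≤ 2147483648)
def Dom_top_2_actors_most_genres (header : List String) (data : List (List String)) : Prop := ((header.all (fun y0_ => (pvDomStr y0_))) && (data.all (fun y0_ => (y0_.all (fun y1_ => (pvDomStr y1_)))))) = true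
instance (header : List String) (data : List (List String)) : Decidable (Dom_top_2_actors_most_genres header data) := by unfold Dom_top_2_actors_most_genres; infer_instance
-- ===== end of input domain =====

-- B replaces A's final "sort all actors by genre count descending, slice to 2" by a single
-- linear best/second-best scan with first-seen tie-breaking (objective: alternative).

-- shared helper: s.split('|') (sep is the non-empty literal "|", so split? never returns none)
def pvSplitBar (s : String) : List String := (PySem.Str.split? s "|").getD []

-- ===== PORT A =====
def top_2_actors_most_genres (header : List String) (data : List (List String)) : List String :=
  -- header.index(...): total form via index?; exact under Pre_ (membership guaranteed)
  let genre_idx : Nat := (PySem.List.index? header "Genre").getD 0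
  let actors_idx : Nat := (PySem.List.index? header "Actors").getD 0
  let actor_genres : PySem.Dict String (PySem.Set String) :=
    data.foldl (fun ag row =>
      -- row[idx]: total form pyGetD, exact under Pre_ (index in range)
      let genres : PySem.Set String := PySem.Set.ofList (pvSplitBar (PySem.List.pyGetD row (genre_idx : Int) ""))
      let actors : List String := pvSplitBar (PySem.List.pyGetD row (actors_idx : Int) "")
      actors.foldl (fun ag actor0 =>
        let actor := PySem.Str.strip actor0
        let ag1 := if ag.contains actor then ag else ag.insert actor PySem.Set.empty
        ag1.modify actor PySem.Set.empty (fun s => PySem.Set.update s genres)) ag) PySem.Dict.empty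
  let actor_genre_count : PySem.Dict String Int :=
    actor_genres.items.foldl (fun d p => d.insert p.1 (PySem.Set.len p.2)) PySem.Dict.empty
  -- key=actor_genre_count.get: every key sorted is present, so .get equals getD _ 0 here
  let sorted_actors := PySem.List.sorted actor_genre_count.keys (fun a => actor_genre_count.getD a 0) true
  PySem.List.slice sorted_actors none (some 2)

-- ===== PORT B =====
-- one step of Source B's best/second-best scan (state = (first, second), each (name, count))
def pvStep2 (st : Option (String × Int) × Option (String × Int)) (p : String × Int) :
    Option (String × Int) × Option (String × Int) :=
  match st with
  | (none, second) => (some p, second)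
  | (some f, second) =>
    if f.2 < p.2 then (some p, some f)
    else
      match second with
      | none => (some f, some p)
      | some s => if s.2 < p.2 then (some f, some p) else (some f, some s)

-- [p[0] for p in (first, second) if p is not None]
def pvOut2 (st : Option (String × Int) × Option (String × Int)) : List String :=
  [st.1, st.2].filterMap (fun o => o.map Prod.fst)

def top_2_actors_most_genres_alt (header : List String) (data : List (List String)) : List String :=
  let gi : Nat := (PySem.List.index? header "Genre").getD 0
  let ai : Nat := (PySem.List.index? header "Actors").getD 0
  let actor_genres : PySem.Dict String (PySem.Set String) :=
    data.foldl (fun d row =>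
      let gs : List String := pvSplitBar (PySem.List.pyGetD row (gi : Int) "")
      (pvSplitBar (PySem.List.pyGetD row (ai : Int) "")).foldl (fun d raw =>
        let name := PySem.Str.strip raw
        d.insert name (PySem.Set.update ((d.get? name).getD PySem.Set.empty) gs)) d) PySem.Dict.empty
  pvOut2 (actor_genres.items.foldl (fun st q => pvStep2 st (q.1, PySem.Set.len q.2)) (none, none))

-- ===== PRECONDITION & SPEC =====
-- Pre_ excludes exactly the inputs where the Python raises: a header missing 'Genre' or
-- 'Actors' (ValueError from header.index) and rows too short for those columns (IndexError).
def Pre_top_2_actors_most_genres (header : List String) (data : List (List String)) : Prop :=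
  "Genre" ∈ header ∧ "Actors" ∈ header ∧
    ∀ row ∈ data, List.idxOf "Genre" header < row.length ∧ List.idxOf "Actors" header < row.length
instance (header : List String) (data : List (List String)) : Decidable (Pre_top_2_actors_most_genres header data) := by unfold Pre_top_2_actors_most_genres; infer_instance

def pvWitness_top_2_actors_most_genres : List String × List (List String) :=
  (["Genre", "Actors"], [["x|y", "a|b"], ["z", "b | c"]])

def Spec_top_2_actors_most_genres (header : List String) (data : List (List String)) (out : List String) : Prop := out = top_2_actors_most_genres_alt header data
instance (header : List String) (data : List (List String)) (out : List String) : Decidable (Spec_top_2_actors_most_genres header data out) := by unfold Spec_top_2_actors_most_genres; infer_instance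

-- ===== CLAIM (what is proved, stated in full; the proofs are below) =====
def Claim_equal_top_2_actors_most_genres : Prop := ∀ (header : List String) (data : List (List String)), Dom_top_2_actors_most_genres header data → Pre_top_2_actors_most_genres header data → Spec_top_2_actors_most_genres header data (top_2_actors_most_genres header data)

-- ===== LEMMAS AND PROOFS =====

-- updating a set with set(gs) is the same as updating it with the list gs
lemma set_update_ofList {α : Type} [BEq α] [LawfulBEq α] (s : PySem.Set α) (gs : List α) :
    PySem.Set.update s (PySem.Set.ofList gs) = PySem.Set.update s gs := by
  rw [PySem.Set.update_eq_append_filter, PySem.Set.update_eq_append_filter, PySem.Set.ofList_ofList]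

-- A's "ensure key exists, then update its set in place" equals B's single insert of the updated set
lemma dict_step_eq (d : PySem.Dict String (PySem.Set String)) (a : String) (gs : List String) :
    (let ag1 := if d.contains a then d else d.insert a PySem.Set.empty
     ag1.modify a PySem.Set.empty (fun s => PySem.Set.update s (PySem.Set.ofList gs)))
    = d.insert a (PySem.Set.update ((d.get? a).getD PySem.Set.empty) gs) := by
  show (if d.contains a then d else d.insert a PySem.Set.empty).modify a PySem.Set.empty
      (fun s => PySem.Set.update s (PySem.Set.ofList gs))
    = d.insert a (PySem.Set.update ((d.get? a).getD PySem.Set.empty) gs)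
  by_cases h : d.contains a = true
  · simp only [h, if_pos]
    show d.insert a (PySem.Set.update (d.getD a PySem.Set.empty) (PySem.Set.ofList gs)) = _
    rw [set_update_ofList]; rfl
  · simp only [h, if_neg, Bool.false_eq_true, not_false_iff]
    show (d.insert a PySem.Set.empty).insert a
        (PySem.Set.update ((d.insert a PySem.Set.empty).getD a PySem.Set.empty) (PySem.Set.ofList gs)) = _
    rw [PySem.Dict.insert_insert_self, PySem.Dict.getD_insert_self, set_update_ofList]
    have : d.get? a = none := by
      rw [PySem.Dict.get?_eq_none_iff_contains]; simpa using h
    rw [this]; rfl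

-- both ports aggregate the same actor→genre-set dict
lemma agg_eq (gi ai : Nat) (data : List (List String)) :
    data.foldl (fun ag row =>
      (pvSplitBar (PySem.List.pyGetD row (ai : Int) "")).foldl (fun ag actor0 =>
        let actor := PySem.Str.strip actor0
        let ag1 := if ag.contains actor then ag else ag.insert actor PySem.Set.empty
        ag1.modify actor PySem.Set.empty
          (fun s => PySem.Set.update s (PySem.Set.ofList (pvSplitBar (PySem.List.pyGetD row (gi : Int) ""))))) ag)
      PySem.Dict.empty
    = data.foldl (fun d row =>
        (pvSplitBar (PySem.List.pyGetD row (ai : Int) "")).foldl (fun d raw =>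
          d.insert (PySem.Str.strip raw)
            (PySem.Set.update ((d.get? (PySem.Str.strip raw)).getD PySem.Set.empty)
              (pvSplitBar (PySem.List.pyGetD row (gi : Int) "")))) d)
        PySem.Dict.empty := by
  have h : (fun (ag : PySem.Dict String (PySem.Set String)) (row : List String) =>
      (pvSplitBar (PySem.List.pyGetD row (ai : Int) "")).foldl (fun ag actor0 =>
        let actor := PySem.Str.strip actor0
        let ag1 := if ag.contains actor then ag else ag.insert actor PySem.Set.empty
        ag1.modify actor PySem.Set.empty
          (fun s => PySem.Set.update s (PySem.Set.ofList (pvSplitBar (PySem.List.pyGetD row (gi : Int) ""))))) ag)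
    = (fun (d : PySem.Dict String (PySem.Set String)) (row : List String) =>
        (pvSplitBar (PySem.List.pyGetD row (ai : Int) "")).foldl (fun d raw =>
          d.insert (PySem.Str.strip raw)
            (PySem.Set.update ((d.get? (PySem.Str.strip raw)).getD PySem.Set.empty)
              (pvSplitBar (PySem.List.pyGetD row (gi : Int) "")))) d) := by
    funext ag row
    have h2 : (fun (d : PySem.Dict String (PySem.Set String)) (actor0 : String) =>
        let actor := PySem.Str.strip actor0
        let ag1 := if d.contains actor then d else d.insert actor PySem.Set.empty
        ag1.modify actor PySem.Set.empty
          (fun s => PySem.Set.update s (PySem.Set.ofList (pvSplitBar (PySem.List.pyGetD row (gi : Int) "")))))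
      = (fun (d : PySem.Dict String (PySem.Set String)) (raw : String) =>
          d.insert (PySem.Str.strip raw)
            (PySem.Set.update ((d.get? (PySem.Str.strip raw)).getD PySem.Set.empty)
              (pvSplitBar (PySem.List.pyGetD row (gi : Int) "")))) := by
      funext d a0
      exact dict_step_eq d (PySem.Str.strip a0) _
    rw [h2]
  rw [h]

-- B's aggregation loop never introduces a duplicate key
lemma nodup_keys_agg (gi ai : Nat) (data : List (List String)) :
    (data.foldl (fun d row =>
        (pvSplitBar (PySem.List.pyGetD row (ai : Int) "")).foldl (fun d raw =>
          d.insert (PySem.Str.strip raw)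
            (PySem.Set.update ((d.get? (PySem.Str.strip raw)).getD PySem.Set.empty)
              (pvSplitBar (PySem.List.pyGetD row (gi : Int) "")))) d)
        (PySem.Dict.empty : PySem.Dict String (PySem.Set String))).keys.Nodup := by
  have main : ∀ (data : List (List String)) (d : PySem.Dict String (PySem.Set String)),
      d.keys.Nodup →
      (data.foldl (fun d row =>
        (pvSplitBar (PySem.List.pyGetD row (ai : Int) "")).foldl (fun d raw =>
          d.insert (PySem.Str.strip raw)
            (PySem.Set.update ((d.get? (PySem.Str.strip raw)).getD PySem.Set.empty)
              (pvSplitBar (PySem.List.pyGetD row (gi : Int) "")))) d) d).keys.Nodup := by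
    intro data
    induction data with
    | nil => intro d hd; simpa using hd
    | cons row rest ih =>
      intro d hd
      simp only [List.foldl_cons]
      exact ih _ (PySem.Dict.nodup_keys_foldl_insert_key _ PySem.Str.strip _ d hd)
  exact main data _ (by simp [PySem.Dict.empty, PySem.Dict.keys])

-- the first two elements of a list, as B's scan state would describe them
def pvStateOf (f : String → Int) (l : List String) :
    Option (String × Int) × Option (String × Int) :=
  match l with
  | [] => (none, none)
  | [a] => (some (a, f a), none)
  | a :: b :: _ => (some (a, f a), some (b, f b))

-- one stable-insertion step of sorted(..., reverse=True) acts on the first two elements like pvStep2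
lemma stateOf_insertBy (f : String → Int) (l : List String) (x : String) :
    pvStateOf f (PySem.List.insertBy (fun a b => decide (f b < f a)) x l)
    = pvStep2 (pvStateOf f l) (x, f x) := by
  match l with
  | [] => rfl
  | [a] =>
    simp only [PySem.List.insertBy, pvStateOf, pvStep2]
    by_cases h : f a < f x <;> simp [h]
  | a :: b :: t =>
    simp only [PySem.List.insertBy, pvStateOf, pvStep2]
    by_cases h1 : f a < f x
    · simp [h1]
    · by_cases h2 : f b < f x <;> simp [h1, h2]

-- B's scan computes the first two elements of the reverse-sorted list
lemma scan_eq_stateOf (f : String → Int) (ks : List String) :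
    ks.foldl (fun st k => pvStep2 st (k, f k)) (none, none)
    = pvStateOf f (PySem.List.sorted ks f true) := by
  rw [PySem.List.sorted_rev_eq_foldl_insertBy]
  have main : ∀ (ks : List String) (l : List String),
      ks.foldl (fun st k => pvStep2 st (k, f k)) (pvStateOf f l)
      = pvStateOf f (ks.foldl (fun acc x => PySem.List.insertBy (fun a b => decide (f b < f a)) x acc) l) := by
    intro ks
    induction ks with
    | nil => intro l; rfl
    | cons k rest ih =>
      intro l
      simp only [List.foldl_cons]
      rw [← stateOf_insertBy, ih]
  exact main ks []

lemma out2_stateOf (f : String → Int) (l : List String) :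
    pvOut2 (pvStateOf f l) = l.take 2 := by
  cases l with
  | nil => rfl
  | cons a t => cases t <;> rfl

-- A's count dict, sort, slice equals B's scan over the (shared) aggregated dict
lemma select_eq (g : PySem.Dict String (PySem.Set String)) (hnd : g.keys.Nodup) :
    (PySem.List.slice (PySem.List.sorted
        (g.items.foldl (fun d p => d.insert p.1 (PySem.Set.len p.2)) PySem.Dict.empty).keys
        (fun a => (g.items.foldl (fun d p => d.insert p.1 (PySem.Set.len p.2)) PySem.Dict.empty).getD a 0)
        true) none (some 2))
    = pvOut2 (g.items.foldl (fun st q => pvStep2 st (q.1, PySem.Set.len q.2)) (none, none)) := by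
  set f : String → Int := fun k => PySem.Set.len (g.getD k PySem.Set.empty) with hf
  set counts := g.items.foldl (fun d p => d.insert p.1 (PySem.Set.len p.2)) PySem.Dict.empty with hc
  have hitems : g.items = g.keys.map (fun k => (k, g.getD k PySem.Set.empty)) :=
    PySem.Dict.items_eq_map_keys g hnd PySem.Set.empty
  have hkeysfst : g.items.map Prod.fst = g.keys := rfl
  have hcitems : counts.items = g.items.map (fun p => (p.1, PySem.Set.len p.2)) := by
    rw [hc, PySem.Dict.items_foldl_insert_fresh g.items Prod.fst (fun p => PySem.Set.len p.2)
      PySem.Dict.empty (by intro a _; rfl) (by rw [hkeysfst]; exact hnd)]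
    rfl
  have hcitems' : counts.items = g.keys.map (fun k => (k, f k)) := by
    rw [hcitems, hitems, List.map_map]; rfl
  have hckeys : counts.keys = g.keys := by
    show counts.items.map Prod.fst = g.keys
    rw [hcitems', List.map_map]
    exact List.map_id g.keys
  have hgetD : ∀ a, counts.getD a 0 = f a := by
    intro a
    by_cases ha : a ∈ g.keys
    · exact PySem.Dict.getD_of_mem_items counts
        (by rw [hcitems']; exact List.mem_map.2 ⟨a, ha, rfl⟩)
        (by rw [hckeys]; exact hnd) 0
    · have h1 : counts.contains a = false := by
        rw [← Bool.not_eq_true, PySem.Dict.contains_iff_mem_keys, hckeys]; exact ha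
      have h2 : g.contains a = false := by
        rw [← Bool.not_eq_true, PySem.Dict.contains_iff_mem_keys]; exact ha
      rw [PySem.Dict.getD_of_not_contains _ _ h1]
      show (0:Int) = PySem.Set.len (g.getD a PySem.Set.empty)
      rw [PySem.Dict.getD_of_not_contains _ _ h2]
      rfl
  have hkeyfun : (fun a => counts.getD a 0) = f := funext hgetD
  rw [hkeyfun, hckeys]
  rw [PySem.List.slice_to _ (by norm_num : (0:Int) ≤ 2)]
  have h2 : ((2:Int).toNat) = 2 := rfl
  rw [h2]
  rw [← out2_stateOf f (PySem.List.sorted g.keys f true), ← scan_eq_stateOf f g.keys]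
  have hbfold : g.items.foldl (fun st q => pvStep2 st (q.1, PySem.Set.len q.2)) (none, none)
      = g.keys.foldl (fun st k => pvStep2 st (k, f k)) (none, none) := by
    rw [hitems, List.foldl_map]
  rw [hbfold]

-- ===== VERDICT (by name: the statement is the Claim_ definition above) =====
theorem top_2_actors_most_genres_spec : Claim_equal_top_2_actors_most_genres := by
  intro header data _ _
  unfold Spec_top_2_actors_most_genres
  simp only [top_2_actors_most_genres, top_2_actors_most_genres_alt]
  rw [agg_eq ((PySem.List.index? header "Genre").getD 0) ((PySem.List.index? header "Actors").getD 0) data]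
  exact select_eq _ (nodup_keys_agg ((PySem.List.index? header "Genre").getD 0) ((PySem.List.index? header "Actors").getD 0) data)
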